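-- pv_equiv track=rewrite | github.com/irtaza780/technical_debt_findings | refactored_code_v2/DetectPalindromes_DefaultOrganization_20250911160644/palindrome_detector.py | _iter_sentences
-- ===== SOURCE A (Python) =====
-- from typing import List, Iterator, Tuple
--
-- SENTENCE_TERMINATORS = ".!?"
--
-- SENTENCE_TRAILING_CHARS = ')"\']'
--
-- def _iter_sentences(line: str) -> Iterator[Tuple[int, int]]:
--     """
--     Yield (start, end) spans of sentence-like segments within a line.
--
--     Sentences end at '.', '!' or '?' with optional trailing quotes/brackets.
--     The final fragment without terminal punctuation is also yielded.
--
--     Args: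
--         line: The line to scan for sentences
--
--     Yields:
--         Tuples of (start_position, end_position) for each sentence
--     """
--     line_length = len(line)
--     sentence_start = 0
--     current_pos = 0
--
--     while current_pos < line_length:
--         if line[current_pos] in SENTENCE_TERMINATORS:
--             sentence_end = current_pos + 1
--
--             # Include typical trailing quotes/brackets adjacent to sentence end
--             while sentence_end < line_length and line[sentence_end] in SENTENCE_TRAILING_CHARS:
--                 sentence_end += 1
--
--             yield sentence_start, sentence_end
--
--             # Skip whitespace before next sentence
--             next_start = sentence_end
--             while next_start < line_length and line[next_start].isspace():
--                 next_start += 1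
--
--             sentence_start = next_start
--             current_pos = next_start
--         else:
--             current_pos += 1
--
--     if sentence_start < line_length:
--         yield sentence_start, line_length
-- ===== SOURCE B (Python) =====
-- SENTENCE_TERMINATORS = ".!?"
--
-- SENTENCE_TRAILING_CHARS = ')"\']'
--
-- def _iter_sentences(line):
--     """Library-driven rewrite: locate the next terminator with str.find (min over
--     the three terminator characters), then measure the trailing-closer run and
--     the whitespace run with slicing + lstrip, instead of a char-by-char scan."""
--     n = len(line)
--     start = 0
--     while True:
--         hits = [k for k in (line.find(c, start) for c in SENTENCE_TERMINATORS) if k != -1]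
--         if not hits:
--             break
--         end = n - len(line[min(hits) + 1:].lstrip(SENTENCE_TRAILING_CHARS))
--         yield (start, end)
--         start = n - len(line[end:].lstrip())
--     if start < n:
--         yield (start, n)
-- ===== Notes on version B (the rewrite author's own statement) =====
-- stated objective: idiomatic
-- what changed: B replaces A's char-by-char index-jumping state machine with standard-library string primitives: the next terminator is found via min over str.find(c, start), and the trailing-closer and whitespace runs are measured by slicing plus lstrip, so B contains no per-character Python loops at all.
import Mathlib
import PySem

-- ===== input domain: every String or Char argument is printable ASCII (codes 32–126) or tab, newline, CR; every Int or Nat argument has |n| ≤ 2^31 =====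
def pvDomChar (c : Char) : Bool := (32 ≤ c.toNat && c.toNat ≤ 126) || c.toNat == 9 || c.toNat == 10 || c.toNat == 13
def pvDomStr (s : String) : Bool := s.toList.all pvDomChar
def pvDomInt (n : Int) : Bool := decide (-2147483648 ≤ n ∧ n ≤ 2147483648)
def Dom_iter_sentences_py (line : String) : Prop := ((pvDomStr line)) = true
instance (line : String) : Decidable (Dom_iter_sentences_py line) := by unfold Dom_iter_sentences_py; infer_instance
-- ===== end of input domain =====

-- B replaces A's char-by-char scanning state machine with standard-library string
-- primitives (str.find per terminator char, slice + lstrip for the runs); objective: idiomatic.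

-- `c in SENTENCE_TERMINATORS` / `c in SENTENCE_TRAILING_CHARS` (single-char membership; shared module constants)
def pvIsTerm (c : Char) : Bool := ['.', '!', '?'].contains c
def pvIsTrail (c : Char) : Bool := [')', '"', '\'', ']'].contains c

-- ===== PORT A =====
-- inner `while sentence_end < line_length and line[sentence_end] in SENTENCE_TRAILING_CHARS`;
-- `fuel` is only a structural totality device: callers pass fuel ≥ cs.length - e, and the
-- loop guard e < cs.length always exits first (each step advances e by 1)
def pvATrail (cs : List Char) (fuel e : Nat) : Nat :=
  match fuel with
  | 0 => e
  | f + 1 =>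
    if h : e < cs.length then
      if pvIsTrail cs[e] then pvATrail cs f (e + 1) else e
    else e

-- inner `while next_start < line_length and line[next_start].isspace()` (same fuel device)
def pvASkip (cs : List Char) (fuel s : Nat) : Nat :=
  match fuel with
  | 0 => s
  | f + 1 =>
    if h : s < cs.length then
      if PySem.Chars.isspace cs[s] then pvASkip cs f (s + 1) else s
    else s

-- outer `while current_pos < line_length: …`, then the trailing-fragment check; pos advances
-- by ≥ 1 per iteration, so fuel ≥ cs.length - pos makes fuel-exhaustion unreachable
def pvALoop (cs : List Char) (fuel : Nat) (start pos : Nat) : List (Int × Int) :=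
  match fuel with
  | 0 => if start < cs.length then [((start : Int), (cs.length : Int))] else []
  | f + 1 =>
    if h : pos < cs.length then
      if pvIsTerm cs[pos] then
        let e := pvATrail cs cs.length (pos + 1)
        let ns := pvASkip cs cs.length e
        ((start : Int), (e : Int)) :: pvALoop cs f ns ns
      else pvALoop cs f start (pos + 1)
    else
      if start < cs.length then [((start : Int), (cs.length : Int))] else []

def iter_sentences_py (line : String) : List (Int × Int) :=
  pvALoop line.toList line.toList.length 0 0

-- ===== PORT B =====
-- the `while True:` loop of Source B; each iteration strictly increases `start`, so
-- fuel = cs.length + 1 is always enough (the fuel-0 fallback is unreachable).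
-- `line.find(c, start)` is PySem.Chars.findFrom; `line[x:]` is PySem.List.slice;
-- `.lstrip(SENTENCE_TRAILING_CHARS)` is ported by hand as dropWhile pvIsTrail (exact:
-- lstrip(chars) removes the longest prefix of characters of chars); `.lstrip()` is PySem.Chars.lstrip
def pvBLoop (cs : List Char) (fuel : Nat) (start : Int) : List (Int × Int) :=
  match fuel with
  | 0 => if start < (cs.length : Int) then [(start, (cs.length : Int))] else []
  | f + 1 =>
    let hits := (['.', '!', '?'].map (fun c => PySem.Chars.findFrom cs [c] start)).filter
      (fun k => k != -1)
    if hits.isEmpty then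
      -- `if not hits: break` followed by the final-fragment yield
      if start < (cs.length : Int) then [(start, (cs.length : Int))] else []
    else
      -- `min(hits)`; hits is nonempty here, so the `.getD 0` default is unreachable
      let t := (PySem.List.min? hits (fun k => k)).getD 0
      let e : Int :=
        (cs.length : Int) - ((PySem.List.slice cs (some (t + 1)) none).dropWhile pvIsTrail).length
      let s' : Int :=
        (cs.length : Int) - (PySem.Chars.lstrip (PySem.List.slice cs (some e) none)).length
      (start, e) :: pvBLoop cs f s'

def iter_sentences_py_alt (line : String) : List (Int × Int) :=
  pvBLoop line.toList (line.toList.length + 1) 0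

-- ===== PRECONDITION & SPEC =====
def Spec_iter_sentences_py (line : String) (out : List (Int × Int)) : Prop := out = iter_sentences_py_alt line
instance (line : String) (out : List (Int × Int)) : Decidable (Spec_iter_sentences_py line out) := by unfold Spec_iter_sentences_py; infer_instance

-- ===== CLAIM (what is proved, stated in full; the proofs are below) =====
def Claim_equal_iter_sentences_py : Prop := ∀ (line : String), Dom_iter_sentences_py line → Spec_iter_sentences_py line (iter_sentences_py line)

-- ===== LEMMAS AND PROOFS =====

theorem pvSinglePrefix (l : List Char) (c : Char) : [c] <+: l ↔ l.head? = some c := by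
  cases l <;> simp [List.cons_prefix_iff]

theorem pvMemTerm (c : Char) (hc : c ∈ ['.', '!', '?']) : pvIsTerm c = true := by
  fin_cases hc <;> decide

-- A's trailing-chars loop measured by a dropWhile (B's lstrip(SENTENCE_TRAILING_CHARS))
theorem pvATrail_char (cs : List Char) (k : Nat) : ∀ e, cs.length - e ≤ k → e ≤ cs.length →
    pvATrail cs k e = cs.length - ((cs.drop e).dropWhile pvIsTrail).length := by
  induction k with
  | zero =>
    intro e hk he
    have : e = cs.length := by omega
    subst this
    simp [pvATrail]
  | succ k ih =>
    intro e hk he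
    by_cases h : e < cs.length
    · have hd : cs.drop e = cs[e] :: cs.drop (e + 1) := List.drop_eq_getElem_cons h
      rw [pvATrail, hd]
      by_cases ht : pvIsTrail cs[e]
      · simp only [dif_pos h, if_pos ht, List.dropWhile_cons_of_pos ht]
        exact ih (e + 1) (by omega) (by omega)
      · simp only [dif_pos h, if_neg ht, List.dropWhile_cons_of_neg (by simpa using ht)]
        simp [List.length_drop]
        omega
    · have : e = cs.length := by omega
      subst this
      simp [pvATrail]

-- A's whitespace loop measured by lstrip (= dropWhile isspace, by definition)
theorem pvASkip_char (cs : List Char) (k : Nat) : ∀ s, cs.length - s ≤ k → s ≤ cs.length →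
    pvASkip cs k s = cs.length - (PySem.Chars.lstrip (cs.drop s)).length := by
  have hl : ∀ l : List Char, PySem.Chars.lstrip l = l.dropWhile PySem.Chars.isspace :=
    fun l => rfl
  induction k with
  | zero =>
    intro s hk hs
    have : s = cs.length := by omega
    subst this
    simp [pvASkip, hl]
  | succ k ih =>
    intro s hk hs
    by_cases h : s < cs.length
    · have hd : cs.drop s = cs[s] :: cs.drop (s + 1) := List.drop_eq_getElem_cons h
      rw [pvASkip, hd, hl]
      by_cases ht : PySem.Chars.isspace cs[s]
      · simp only [dif_pos h, if_pos ht, List.dropWhile_cons_of_pos ht]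
        rw [ih (s + 1) (by omega) (by omega), hl]
      · simp only [dif_pos h, if_neg ht, List.dropWhile_cons_of_neg (by simpa using ht)]
        simp [List.length_drop]
        omega
    · have : s = cs.length := by omega
      subst this
      simp [pvASkip, hl]

theorem pvATrail_ge (cs : List Char) (f : Nat) : ∀ e, e ≤ pvATrail cs f e := by
  induction f with
  | zero => intro e; simp [pvATrail]
  | succ f ih =>
    intro e
    rw [pvATrail]
    by_cases h : e < cs.length
    · by_cases ht : pvIsTrail cs[e]
      · simp only [dif_pos h, if_pos ht]
        have := ih (e + 1)
        omega
      · simp [h, ht]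
    · simp [h]

theorem pvASkip_ge (cs : List Char) (f : Nat) : ∀ s, s ≤ pvASkip cs f s := by
  induction f with
  | zero => intro s; simp [pvASkip]
  | succ f ih =>
    intro s
    rw [pvASkip]
    by_cases h : s < cs.length
    · by_cases ht : PySem.Chars.isspace cs[s]
      · simp only [dif_pos h, if_pos ht]
        have := ih (s + 1)
        omega
      · simp [h, ht]
    · simp [h]

theorem pvATrail_le (cs : List Char) (f : Nat) : ∀ e, e ≤ cs.length → pvATrail cs f e ≤ cs.length := by
  induction f with
  | zero => intro e he; simpa [pvATrail] using he
  | succ f ih =>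
    intro e he
    rw [pvATrail]
    by_cases h : e < cs.length
    · by_cases ht : pvIsTrail cs[e]
      · simp only [dif_pos h, if_pos ht]
        exact ih (e + 1) (by omega)
      · simp [h, ht]; omega
    · simp [h]; omega

theorem pvASkip_le (cs : List Char) (f : Nat) : ∀ s, s ≤ cs.length → pvASkip cs f s ≤ cs.length := by
  induction f with
  | zero => intro s hs; simpa [pvASkip] using hs
  | succ f ih =>
    intro s hs
    rw [pvASkip]
    by_cases h : s < cs.length
    · by_cases ht : PySem.Chars.isspace cs[s]
      · simp only [dif_pos h, if_pos ht]
        exact ih (s + 1) (by omega)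
      · simp [h, ht]; omega
    · simp [h]; omega

-- with no terminator at or after `s`, every str.find comes back -1 and the hit list is empty
theorem pvHits_none (cs : List Char) (s : Nat) (hs : s ≤ cs.length)
    (hno : ∀ j, s ≤ j → j < cs.length → pvIsTerm (cs.getD j ' ') = false) :
    (['.', '!', '?'].map (fun c => PySem.Chars.findFrom cs [c] (s : Int))).filter
      (fun k => k != -1) = [] := by
  have hneg : ∀ c ∈ ['.', '!', '?'], PySem.Chars.findFrom cs [c] (s : Int) = -1 := by
    intro c hc
    rw [PySem.Chars.findFrom_natCast_eq_neg_one_iff cs [c] s hs]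
    rw [List.singleton_infix_iff]
    intro hmem
    obtain ⟨i, hi, hget⟩ := List.mem_iff_getElem.mp hmem
    have hlen : (cs.drop s).length = cs.length - s := List.length_drop
    have hgd : (cs.drop s)[i] = cs[s + i]'(by omega) := List.getElem_drop ..
    have := hno (s + i) (by omega) (by omega)
    rw [List.getD_eq_getElem?_getD] at this
    rw [List.getElem?_eq_getElem (by omega : s + i < cs.length)] at this
    simp only [Option.getD_some] at this
    rw [← hgd, hget] at this
    exact absurd this (by simp [pvMemTerm c hc])
  rw [List.filter_eq_nil_iff]
  intro k hk
  obtain ⟨c, hc, hck⟩ := List.mem_map.mp hk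
  rw [← hck, hneg c hc]
  simp

-- with no terminator in [s, pos) and a terminator at pos, min(hits) is exactly pos
theorem pvHits_min (cs : List Char) (s pos : Nat) (hsp : s ≤ pos) (hpos : pos < cs.length)
    (hterm : pvIsTerm (cs[pos]'hpos) = true)
    (hno : ∀ j, s ≤ j → j < pos → pvIsTerm (cs.getD j ' ') = false) :
    PySem.List.min?
      ((['.', '!', '?'].map (fun c => PySem.Chars.findFrom cs [c] (s : Int))).filter
        (fun k => k != -1)) (fun k => k) = some ((pos : Nat) : Int) := by
  have hsl : s ≤ cs.length := by omega
  -- every non(-1) find result is ≥ pos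
  have hlow : ∀ c ∈ ['.', '!', '?'], PySem.Chars.findFrom cs [c] (s : Int) ≠ -1 →
      (pos : Int) ≤ PySem.Chars.findFrom cs [c] (s : Int) := by
    intro c hc hne
    obtain ⟨h1, h2, _⟩ := PySem.Chars.findFrom_natCast_spec cs [c] s hsl hne
    set r := PySem.Chars.findFrom cs [c] (s : Int) with hr
    have hr0 : 0 ≤ r := le_trans (by exact_mod_cast Nat.zero_le s) h1
    by_contra hlt
    have hlt2 : PySem.Chars.findFrom cs [c] (s : Int) < (pos : Int) := lt_of_not_ge hlt
    have hrn : r.toNat < pos := by omega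
    have hsr : s ≤ r.toNat := by omega
    rw [pvSinglePrefix, List.head?_drop] at h2
    have := hno r.toNat hsr hrn
    rw [List.getD_eq_getElem?_getD, h2] at this
    simp only [Option.getD_some] at this
    exact absurd this (by simp [pvMemTerm c hc])
  -- the terminator character itself is found exactly at pos
  have hc0 : (cs[pos]'hpos) ∈ ['.', '!', '?'] := by simpa [pvIsTerm] using hterm
  have hne0 : PySem.Chars.findFrom cs [cs[pos]'hpos] (s : Int) ≠ -1 := by
    rw [Ne, PySem.Chars.findFrom_natCast_eq_neg_one_iff cs _ s hsl, List.singleton_infix_iff]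
    rw [not_not]
    rw [List.mem_iff_getElem]
    refine ⟨pos - s, by simp [List.length_drop]; omega, ?_⟩
    rw [List.getElem_drop]
    congr 1
    omega
  have heq0 : PySem.Chars.findFrom cs [cs[pos]'hpos] (s : Int) = (pos : Int) := by
    obtain ⟨h1, _, h3⟩ := PySem.Chars.findFrom_natCast_spec cs [cs[pos]'hpos] s hsl hne0
    set r := PySem.Chars.findFrom cs [cs[pos]'hpos] (s : Int) with hr
    have hr0 : 0 ≤ r := le_trans (by exact_mod_cast Nat.zero_le s) h1
    have hple : r.toNat ≤ pos := by
      by_contra hgt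
      apply h3 pos hsp (lt_of_not_ge hgt)
      rw [pvSinglePrefix, List.head?_drop]
      exact List.getElem?_eq_getElem hpos
    have hlge : (pos : Int) ≤ r := hlow _ hc0 hne0
    omega
  -- assemble: pos is a hit and every hit is ≥ pos, so min(hits) = pos
  have hmem0 : ((pos : Nat) : Int) ∈
      (['.', '!', '?'].map (fun c => PySem.Chars.findFrom cs [c] (s : Int))).filter
        (fun k => k != -1) := by
    rw [List.mem_filter]
    constructor
    · rw [← heq0]
      exact List.mem_map.mpr ⟨_, hc0, rfl⟩
    · simp
  cases hmin : PySem.List.min?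
      ((['.', '!', '?'].map (fun c => PySem.Chars.findFrom cs [c] (s : Int))).filter
        (fun k => k != -1)) (fun k => k) with
  | none =>
    rw [PySem.List.min?_eq_none_iff] at hmin
    rw [hmin] at hmem0
    exact absurd hmem0 (List.not_mem_nil)
  | some m =>
    have hm1 : m ≤ ((pos : Nat) : Int) := PySem.List.min?_isMin hmin _ hmem0
    have hm2 : ((pos : Nat) : Int) ≤ m := by
      have hin := PySem.List.min?_mem hmin
      rw [List.mem_filter] at hin
      obtain ⟨hmap, hne⟩ := hin
      obtain ⟨c, hc, hcm⟩ := List.mem_map.mp hmap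
      rw [← hcm]
      exact hlow c hc (by rw [← hcm] at hne; simpa using hne)
    have : m = ((pos : Nat) : Int) := le_antisymm hm1 hm2
    rw [this]

-- the loop-exit emission of the final fragment agrees between the two programs
theorem pvFinal (cs : List Char) (g start : Nat) (hs : start ≤ cs.length) (hg : 1 ≤ g)
    (hno : ∀ j, start ≤ j → j < cs.length → pvIsTerm (cs.getD j ' ') = false) :
    (if start < cs.length then [((start : Int), (cs.length : Int))] else [])
      = pvBLoop cs g (start : Int) := by
  cases g with
  | zero => omega
  | succ g0 =>
    rw [pvBLoop]
    simp only [pvHits_none cs start hs hno, List.isEmpty_nil, if_true]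
    by_cases h : start < cs.length
    · rw [if_pos h, if_pos (by exact_mod_cast h)]
    · rw [if_neg h, if_neg (by exact_mod_cast h)]

-- main loop correspondence: A's scanner at (start, pos) with no terminator in [start, pos)
-- equals B's find-driven loop at start
theorem pvMainAux (cs : List Char) (f : Nat) : ∀ g start pos, start ≤ pos → pos ≤ cs.length →
    cs.length - pos ≤ f → cs.length - pos + 1 ≤ g →
    (∀ j, start ≤ j → j < pos → pvIsTerm (cs.getD j ' ') = false) →
    pvALoop cs f start pos = pvBLoop cs g (start : Int) := by
  induction f with
  | zero =>
    intro g start pos hsp hpl hf hg hno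
    have hpe : pos = cs.length := by omega
    subst hpe
    rw [pvALoop]
    exact pvFinal cs g start (by omega) (by omega) hno
  | succ f ih =>
    intro g start pos hsp hpl hf hg hno
    by_cases h : pos < cs.length
    · rw [pvALoop]
      by_cases ht : pvIsTerm cs[pos]
      · simp only [dif_pos h, if_pos ht]
        cases g with
        | zero => omega
        | succ g0 =>
          have hmin := pvHits_min cs start pos hsp h ht hno
          have hne : (((['.', '!', '?'].map
              (fun c => PySem.Chars.findFrom cs [c] ((start : Nat) : Int))).filter
                (fun k => k != -1)).isEmpty) = false := by
            rcases hemp : (['.', '!', '?'].map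
                (fun c => PySem.Chars.findFrom cs [c] ((start : Nat) : Int))).filter
                  (fun k => k != -1) with _ | _
            · rw [hemp] at hmin
              simp [PySem.List.min?] at hmin
            · simp
          rw [pvBLoop]
          simp only [hne, Bool.false_eq_true, if_false, hmin, Option.getD_some]
          set E := pvATrail cs cs.length (pos + 1) with hE
          have hE1 : pos + 1 ≤ E := pvATrail_ge cs cs.length (pos + 1)
          have hE2 : E ≤ cs.length := pvATrail_le cs cs.length (pos + 1) (by omega)
          set NS := pvASkip cs cs.length E with hNS
          have hN1 : E ≤ NS := pvASkip_ge cs cs.length E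
          have hN2 : NS ≤ cs.length := pvASkip_le cs cs.length E hE2
          have hcast1 : ((pos : Int) + 1) = ((pos + 1 : Nat) : Int) := by push_cast; ring
          have hdw : ((cs.drop (pos + 1)).dropWhile pvIsTrail).length ≤ cs.length := by
            calc ((cs.drop (pos + 1)).dropWhile pvIsTrail).length
                ≤ (cs.drop (pos + 1)).length := List.length_dropWhile_le ..
              _ ≤ cs.length := by rw [List.length_drop]; omega
          have heE : (cs.length : Int) -
              ((PySem.List.slice cs (some ((pos : Int) + 1)) none).dropWhile pvIsTrail).length
                = (E : Int) := by
            rw [hcast1, PySem.List.slice_from_natCast]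
            rw [hE, pvATrail_char cs cs.length (pos + 1) (by omega) (by omega)]
            omega
          rw [heE]
          have hdw2 : (PySem.Chars.lstrip (cs.drop E)).length ≤ cs.length := by
            have : PySem.Chars.lstrip (cs.drop E) = (cs.drop E).dropWhile PySem.Chars.isspace :=
              rfl
            rw [this]
            calc ((cs.drop E).dropWhile PySem.Chars.isspace).length
                ≤ (cs.drop E).length := List.length_dropWhile_le ..
              _ ≤ cs.length := by rw [List.length_drop]; omega
          have heS : (cs.length : Int) -
              (PySem.Chars.lstrip (PySem.List.slice cs (some (E : Int)) none)).length
                = (NS : Int) := by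
            rw [PySem.List.slice_from_natCast]
            rw [hNS, pvASkip_char cs cs.length E (by omega) hE2]
            omega
          rw [heS]
          rw [ih g0 NS NS (le_refl _) hN2 (by omega) (by omega) (by intro j hj hjq; omega)]
      · simp only [dif_pos h, if_neg ht]
        apply ih g start (pos + 1) (by omega) (by omega) (by omega) (by omega)
        intro j hj hjq
        by_cases hje : j = pos
        · subst hje
          rw [List.getD_eq_getElem?_getD, List.getElem?_eq_getElem h]
          simpa using ht
        · exact hno j hj (by omega)
    · have hpe : pos = cs.length := by omega
      subst hpe
      rw [pvALoop]
      simp only [dif_neg h]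
      exact pvFinal cs g start (by omega) (by omega) hno

-- ===== VERDICT (by name: the statement is the Claim_ definition above) =====
theorem iter_sentences_py_spec : Claim_equal_iter_sentences_py := by
  intro line _
  show iter_sentences_py line = iter_sentences_py_alt line
  unfold iter_sentences_py iter_sentences_py_alt
  exact pvMainAux line.toList line.toList.length (line.toList.length + 1) 0 0
    (by omega) (by omega) (by omega) (by omega) (by intro j hj hjq; omega)
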